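-- pv_equiv track=rewrite | github.com/Ahemad7429/Problem-Solving | session_tests/sessiojn_test.py | max_deliciousness
-- ===== SOURCE A (Python) =====
-- def max_deliciousness(n, nums, k):
--     # Function to calculate bitwise OR of a list
--     def bitwise_or(lst):
--         result = 0
--         for num in lst:
--             result |= num
--         return result
--
--     # Calculate the initial bitwise OR of all dishes
--     initial_or = bitwise_or(nums)
--
--     max_or = initial_or
--
--     # Simulate doubling operations for each dish
--     for i in range(n):
--         current = nums[i]
--         temp_nums = nums[:]
--
--         for _ in range(k):
--             current *= 2
--             temp_nums[i] = current
--             current_or = bitwise_or(temp_nums)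
--             max_or = max(max_or, current_or)
--
--     return max_or
-- ===== SOURCE B (Python) =====
-- def max_deliciousness(n, nums, k):
--     # prefix/suffix OR arrays: OR of the other dishes in O(1) per configuration
--     m = len(nums)
--     pre = [0]
--     for x in nums:
--         pre.append(pre[-1] | x)
--     suf = [0] * (m + 1)
--     for i in range(m - 1, -1, -1):
--         suf[i] = nums[i] | suf[i + 1]
--     best = pre[m]
--     for i in range(n):
--         rest = pre[i] | suf[i + 1]
--         cur = nums[i]
--         for _ in range(k):
--             cur *= 2
--             best = max(best, rest | cur)
--     return best
-- ===== Notes on version B (the rewrite author's own statement) =====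
-- stated objective: faster
-- what changed: B precomputes prefix and suffix OR arrays once, so the OR of each doubled configuration is one O(1) bitwise OR instead of A's fresh copy and full rescan of the list for every (dish, doubling-step) pair.
import Mathlib
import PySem

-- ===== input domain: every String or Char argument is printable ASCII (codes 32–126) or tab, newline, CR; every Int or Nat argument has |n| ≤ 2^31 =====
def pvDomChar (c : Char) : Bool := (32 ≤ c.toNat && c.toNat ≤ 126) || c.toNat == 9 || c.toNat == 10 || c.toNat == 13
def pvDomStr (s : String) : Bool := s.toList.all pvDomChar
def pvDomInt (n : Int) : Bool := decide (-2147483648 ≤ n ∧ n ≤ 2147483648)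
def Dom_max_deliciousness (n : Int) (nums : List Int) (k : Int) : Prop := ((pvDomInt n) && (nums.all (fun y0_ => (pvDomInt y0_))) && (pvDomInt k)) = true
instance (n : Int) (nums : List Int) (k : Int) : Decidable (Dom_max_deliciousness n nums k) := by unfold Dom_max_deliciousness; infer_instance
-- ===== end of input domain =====

-- B replaces A's per-step OR scan over a fresh copy of the whole list by prefix/suffix OR arrays,
-- so each doubled configuration costs one OR instead of a full scan.

-- ===== PORT A =====
-- A's inner helper bitwise_or(lst)
def pvBitwiseOr (lst : List Int) : Int :=
  lst.foldl (fun result num => PySem.Int.bor result num) 0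

def max_deliciousness (n : Int) (nums : List Int) (k : Int) : Int :=
  let initial_or := pvBitwiseOr nums
  let max_or := initial_or
  (PySem.List.pyRange 0 n 1).foldl (fun max_or i =>
    -- current = nums[i]; temp_nums = nums[:]  (Pre_ guarantees 0 ≤ i < len nums)
    let current := PySem.List.pyGetD nums i 0
    let temp_nums := nums
    ((PySem.List.pyRange 0 k 1).foldl (fun (st : Int × List Int × Int) _ =>
      let current := st.1 * 2
      let temp_nums := st.2.1.set i.toNat current
      let current_or := pvBitwiseOr temp_nums
      (current, temp_nums, max st.2.2 current_or)) (current, temp_nums, max_or)).2.2) max_or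

-- ===== PORT B =====
-- Source B: pre = [0]; for x in nums: pre.append(pre[-1] | x)
def pvOrScan : List Int → Int → List Int
  | [], a => [a]
  | x :: xs, a => a :: pvOrScan xs (PySem.Int.bor a x)

-- Source B: for i in range(m-1, -1, -1): suf[i] = nums[i] | suf[i+1]  (right-to-left = structural recursion)
def pvSufOr : List Int → List Int
  | [] => [0]
  | x :: xs =>
    let r := pvSufOr xs
    PySem.Int.bor x (r.headD 0) :: r

def max_deliciousness_alt (n : Int) (nums : List Int) (k : Int) : Int :=
  let m := nums.length
  let pre := pvOrScan nums 0
  let suf := pvSufOr nums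
  let best := pre.getD m 0
  (PySem.List.pyRange 0 n 1).foldl (fun best i =>
    let rest := PySem.Int.bor (pre.getD i.toNat 0) (suf.getD (i.toNat + 1) 0)
    ((PySem.List.pyRange 0 k 1).foldl (fun (st : Int × Int) _ =>
      let cur := st.1 * 2
      (cur, max st.2 (PySem.Int.bor rest cur))) (PySem.List.pyGetD nums i 0, best)).2) best

-- ===== PRECONDITION & SPEC =====
-- Python A raises IndexError (nums[i] at i = len(nums)) exactly when n > len(nums); nothing else raises.
def Pre_max_deliciousness (n : Int) (nums : List Int) (k : Int) : Prop :=
  n ≤ (nums.length : Int)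
instance (n : Int) (nums : List Int) (k : Int) : Decidable (Pre_max_deliciousness n nums k) := by
  unfold Pre_max_deliciousness; infer_instance

def pvWitness_max_deliciousness : Int × List Int × Int := (2, [1, 2, 3], 2)

def Spec_max_deliciousness (n : Int) (nums : List Int) (k : Int) (out : Int) : Prop := out = max_deliciousness_alt n nums k
instance (n : Int) (nums : List Int) (k : Int) (out : Int) : Decidable (Spec_max_deliciousness n nums k out) := by unfold Spec_max_deliciousness; infer_instance

-- ===== CLAIM (what is proved, stated in full; the proofs are below) =====
def Claim_equal_max_deliciousness : Prop := ∀ (n : Int) (nums : List Int) (k : Int), Dom_max_deliciousness n nums k → Pre_max_deliciousness n nums k → Spec_max_deliciousness n nums k (max_deliciousness n nums k)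

-- ===== LEMMAS AND PROOFS =====

-- ---- bit-level groundwork: a testBit view of Python ints, giving associativity of `|` ----
def pvTb (a : Int) (k : Nat) : Bool :=
  if 0 ≤ a then a.toNat.testBit k else !((-a - 1).toNat.testBit k)

theorem pv_or_eq_add (m : Nat) : ∀ n : Nat, m &&& n = 0 → m ||| n = m + n := by
  induction m using Nat.strong_induction_on with
  | _ m ih =>
    intro n h
    rcases Nat.eq_zero_or_pos m with hm | hm
    · subst hm; simp
    · have hdiv : m / 2 &&& n / 2 = 0 := by
        rw [← Nat.and_div_two, h]
      have h3 : m / 2 ||| n / 2 = m / 2 + n / 2 :=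
        ih (m / 2) (Nat.div_lt_self hm (by norm_num)) (n / 2) hdiv
      have hb : (m &&& n).testBit 0 = false := by rw [h]; simp
      rw [Nat.testBit_and, Nat.testBit_zero, Nat.testBit_zero] at hb
      have h1 : ¬(m % 2 = 1 ∧ n % 2 = 1) := by simpa using hb
      have h2 : (m ||| n).testBit 0 = (m.testBit 0 || n.testBit 0) := Nat.testBit_or ..
      rw [Nat.testBit_zero, Nat.testBit_zero, Nat.testBit_zero] at h2
      have h2' : ((m ||| n) % 2 = 1) ↔ (m % 2 = 1 ∨ n % 2 = 1) := by
        constructor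
        · intro hx; have := h2; rw [decide_eq_true hx] at this; simpa using this.symm
        · intro hx
          rcases hx with hx | hx <;>
            [rw [decide_eq_true hx] at h2; rw [decide_eq_true hx] at h2] <;>
            simp at h2 <;> simpa using h2
      have hd : (m ||| n) / 2 = m / 2 ||| n / 2 := Nat.or_div_two
      omega

theorem pv_sub_tb (m x k : Nat) : (m - (m &&& x)).testBit k = (m.testBit k && !(x.testBit k)) := by
  have hdisj : (m &&& x) &&& (m ^^^ (m &&& x)) = 0 := by
    apply Nat.eq_of_testBit_eq
    intro i
    simp only [Nat.testBit_and, Nat.testBit_xor, Nat.zero_testBit]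
    cases m.testBit i <;> cases x.testBit i <;> simp
  have hor : (m &&& x) ||| (m ^^^ (m &&& x)) = m := by
    apply Nat.eq_of_testBit_eq
    intro i
    simp only [Nat.testBit_or, Nat.testBit_xor, Nat.testBit_and]
    cases m.testBit i <;> cases x.testBit i <;> simp
  have hadd := pv_or_eq_add _ _ hdisj
  rw [hor] at hadd
  have hsub : m - (m &&& x) = m ^^^ (m &&& x) := by omega
  rw [hsub, Nat.testBit_xor, Nat.testBit_and]
  cases m.testBit k <;> cases x.testBit k <;> simp
theorem pvTb_bor (a b : Int) (k : Nat) : pvTb (PySem.Int.bor a b) k = (pvTb a k || pvTb b k) := by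
  by_cases ha : 0 ≤ a <;> by_cases hb : 0 ≤ b
  · simp only [PySem.Int.bor, if_pos ha, if_pos hb, pvTb]
    simp [Nat.testBit_or]
  · simp only [PySem.Int.bor, if_pos ha, if_neg hb, pvTb]
    have h2 : (-(-(↑((-b - 1).toNat - ((-b - 1).toNat &&& a.toNat)) : Int) - 1) - 1).toNat
        = (-b - 1).toNat - ((-b - 1).toNat &&& a.toNat) := by omega
    rw [h2, pv_sub_tb]
    cases (-b - 1).toNat.testBit k <;> cases a.toNat.testBit k <;> simp <;> omega
  · simp only [PySem.Int.bor, if_neg ha, if_pos hb, pvTb]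
    have h2 : (-(-(↑((-a - 1).toNat - ((-a - 1).toNat &&& b.toNat)) : Int) - 1) - 1).toNat
        = (-a - 1).toNat - ((-a - 1).toNat &&& b.toNat) := by omega
    rw [h2, pv_sub_tb]
    cases (-a - 1).toNat.testBit k <;> cases b.toNat.testBit k <;> simp <;> omega
  · simp only [PySem.Int.bor, if_neg ha, if_neg hb, pvTb]
    have h2 : (-(-(↑((-a - 1).toNat &&& (-b - 1).toNat) : Int) - 1) - 1).toNat
        = (-a - 1).toNat &&& (-b - 1).toNat := by omega
    rw [h2, Nat.testBit_and]
    cases (-a - 1).toNat.testBit k <;> cases (-b - 1).toNat.testBit k <;> simp <;> omega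
theorem pvTb_inj (a b : Int) (h : ∀ k, pvTb a k = pvTb b k) : a = b := by
  by_cases ha : 0 ≤ a <;> by_cases hb : 0 ≤ b
  · have : a.toNat = b.toNat := by
      apply Nat.eq_of_testBit_eq
      intro i
      have := h i
      simpa [pvTb, ha, hb] using this
    omega
  · exfalso
    set K := a.toNat + (-b - 1).toNat with hK
    have h1 : a.toNat.testBit K = false :=
      Nat.testBit_eq_false_of_lt (lt_of_le_of_lt (by omega) Nat.lt_two_pow_self)
    have h2 : (-b - 1).toNat.testBit K = false :=
      Nat.testBit_eq_false_of_lt (lt_of_le_of_lt (by omega) Nat.lt_two_pow_self)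
    have := h K
    rw [pvTb, pvTb, if_pos ha, if_neg hb, h1, h2] at this
    simp at this
  · exfalso
    set K := b.toNat + (-a - 1).toNat with hK
    have h1 : b.toNat.testBit K = false :=
      Nat.testBit_eq_false_of_lt (lt_of_le_of_lt (by omega) Nat.lt_two_pow_self)
    have h2 : (-a - 1).toNat.testBit K = false :=
      Nat.testBit_eq_false_of_lt (lt_of_le_of_lt (by omega) Nat.lt_two_pow_self)
    have := h K
    rw [pvTb, pvTb, if_neg ha, if_pos hb, h2, h1] at this
    simp at this
  · have : (-a - 1).toNat = (-b - 1).toNat := by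
      apply Nat.eq_of_testBit_eq
      intro i
      have := h i
      rw [pvTb, pvTb, if_neg ha, if_neg hb] at this
      simpa using this
    omega

theorem pv_bor_assoc (a b c : Int) :
    PySem.Int.bor (PySem.Int.bor a b) c = PySem.Int.bor a (PySem.Int.bor b c) := by
  apply pvTb_inj
  intro k
  simp [pvTb_bor, Bool.or_assoc]

theorem pv_zero_bor (a : Int) : PySem.Int.bor 0 a = a := by
  rw [PySem.Int.bor_comm]; exact PySem.Int.bor_zero a

-- ---- fold-level facts about pvBitwiseOr ----
theorem pv_foldl_bor (xs : List Int) : ∀ a : Int,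
    xs.foldl (fun r x => PySem.Int.bor r x) a = PySem.Int.bor a (pvBitwiseOr xs) := by
  induction xs with
  | nil => intro a; simp [pvBitwiseOr, PySem.Int.bor_zero]
  | cons x xs ih =>
    intro a
    show xs.foldl _ (PySem.Int.bor a x) = PySem.Int.bor a (pvBitwiseOr (x :: xs))
    rw [ih]
    show _ = PySem.Int.bor a (xs.foldl _ (PySem.Int.bor 0 x))
    rw [ih (PySem.Int.bor 0 x), pv_zero_bor, pv_bor_assoc]
theorem pvBitwiseOr_cons (x : Int) (xs : List Int) :
    pvBitwiseOr (x :: xs) = PySem.Int.bor x (pvBitwiseOr xs) := by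
  show xs.foldl _ (PySem.Int.bor 0 x) = _
  rw [pv_foldl_bor, pv_zero_bor]
theorem pvBitwiseOr_append (xs ys : List Int) :
    pvBitwiseOr (xs ++ ys) = PySem.Int.bor (pvBitwiseOr xs) (pvBitwiseOr ys) := by
  show (xs ++ ys).foldl _ 0 = _
  rw [List.foldl_append, pv_foldl_bor]
  rfl
theorem pvBitwiseOr_set (xs : List Int) (i : Nat) (hi : i < xs.length) (x : Int) :
    pvBitwiseOr (xs.set i x) =
      PySem.Int.bor (pvBitwiseOr (xs.take i))
        (PySem.Int.bor x (pvBitwiseOr (xs.drop (i + 1)))) := by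
  rw [List.set_eq_take_append_cons_drop, if_pos hi, pvBitwiseOr_append, pvBitwiseOr_cons]

-- ---- the scan arrays of B compute prefix/suffix ORs ----
theorem pvOrScan_getD (xs : List Int) : ∀ (a : Int) (i : Nat), i ≤ xs.length →
    (pvOrScan xs a).getD i 0 = (xs.take i).foldl (fun r x => PySem.Int.bor r x) a := by
  induction xs with
  | nil =>
    intro a i h
    have : i = 0 := by simpa using h
    subst this
    simp [pvOrScan]
  | cons x xs ih =>
    intro a i h
    cases i with
    | zero => simp [pvOrScan]
    | succ j =>
      simp only [pvOrScan, List.getD_cons_succ, List.take_succ_cons, List.foldl_cons]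
      exact ih _ j (by simpa using h)
theorem pvSufOr_headD (xs : List Int) : (pvSufOr xs).headD 0 = pvBitwiseOr xs := by
  induction xs with
  | nil => simp [pvSufOr, pvBitwiseOr]
  | cons x xs ih =>
    rw [pvBitwiseOr_cons, ← ih]
    rfl
theorem pvSufOr_getD (xs : List Int) : ∀ i : Nat, i ≤ xs.length →
    (pvSufOr xs).getD i 0 = pvBitwiseOr (xs.drop i) := by
  induction xs with
  | nil =>
    intro i h
    have : i = 0 := by simpa using h
    subst this
    simp [pvSufOr, pvBitwiseOr]
  | cons x xs ih =>
    intro i h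
    cases i with
    | zero =>
      simp only [pvSufOr, List.getD_cons_zero, List.drop_zero, pvBitwiseOr_cons, pvSufOr_headD]
    | succ j =>
      simp only [pvSufOr, List.getD_cons_succ, List.drop_succ_cons]
      exact ih j (by simpa using h)

-- ---- the inner doubling loops agree ----
theorem pv_inner (nums : List Int) (i : Nat) (hi : i < nums.length) (L : List Int) :
    ∀ (c b : Int) (t : List Int), (∀ x : Int, t.set i x = nums.set i x) →
    (L.foldl (fun (st : Int × List Int × Int) _ =>
        (st.1 * 2, st.2.1.set i (st.1 * 2),
          max st.2.2 (pvBitwiseOr (st.2.1.set i (st.1 * 2))))) (c, t, b)).2.2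
    = (L.foldl (fun (st : Int × Int) _ =>
        (st.1 * 2, max st.2 (PySem.Int.bor (PySem.Int.bor ((pvOrScan nums 0).getD i 0)
          ((pvSufOr nums).getD (i + 1) 0)) (st.1 * 2)))) (c, b)).2 := by
  induction L with
  | nil => intro c b t ht; rfl
  | cons y L ih =>
    intro c b t ht
    simp only [List.foldl_cons]
    rw [ht (c * 2)]
    have hA : pvBitwiseOr (nums.set i (c * 2))
        = PySem.Int.bor (PySem.Int.bor ((pvOrScan nums 0).getD i 0)
            ((pvSufOr nums).getD (i + 1) 0)) (c * 2) := by
      rw [pvBitwiseOr_set nums i hi, pvOrScan_getD nums 0 i (le_of_lt hi),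
        pvSufOr_getD nums (i + 1) hi]
      rw [pv_bor_assoc, PySem.Int.bor_comm (c * 2) (pvBitwiseOr (List.drop (i + 1) nums))]
      rfl
    rw [hA]
    exact ih (c * 2)
      (max b (PySem.Int.bor (PySem.Int.bor ((pvOrScan nums 0).getD i 0)
        ((pvSufOr nums).getD (i + 1) 0)) (c * 2)))
      (nums.set i (c * 2)) (fun x => List.set_set _)

-- ---- unfolding the two ports to their fold form ----
theorem max_deliciousness_def (n : Int) (nums : List Int) (k : Int) :
    max_deliciousness n nums k =
      (PySem.List.pyRange 0 n 1).foldl (fun max_or i =>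
        ((PySem.List.pyRange 0 k 1).foldl (fun (st : Int × List Int × Int) _ =>
          (st.1 * 2, st.2.1.set i.toNat (st.1 * 2),
            max st.2.2 (pvBitwiseOr (st.2.1.set i.toNat (st.1 * 2)))))
          (PySem.List.pyGetD nums i 0, nums, max_or)).2.2) (pvBitwiseOr nums) := rfl

theorem max_deliciousness_alt_def (n : Int) (nums : List Int) (k : Int) :
    max_deliciousness_alt n nums k =
      (PySem.List.pyRange 0 n 1).foldl (fun best i =>
        ((PySem.List.pyRange 0 k 1).foldl (fun (st : Int × Int) _ =>
          (st.1 * 2, max st.2 (PySem.Int.bor (PySem.Int.bor ((pvOrScan nums 0).getD i.toNat 0)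
            ((pvSufOr nums).getD (i.toNat + 1) 0)) (st.1 * 2))))
          (PySem.List.pyGetD nums i 0, best)).2) ((pvOrScan nums 0).getD nums.length 0) := rfl

-- ===== VERDICT (by name: the statement is the Claim_ definition above) =====
theorem max_deliciousness_spec : Claim_equal_max_deliciousness := by
  intro n nums k hdom hpre
  unfold Spec_max_deliciousness
  rw [max_deliciousness_def, max_deliciousness_alt_def]
  have hinit : (pvOrScan nums 0).getD nums.length 0 = pvBitwiseOr nums := by
    rw [pvOrScan_getD nums 0 nums.length le_rfl, List.take_length]
    rfl
  rw [hinit]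
  apply PySem.List.foldl_congr_mem
  intro acc i hmem
  rw [PySem.List.mem_pyRange_one] at hmem
  have hi : i.toNat < nums.length := by
    have := hpre
    unfold Pre_max_deliciousness at this
    omega
  exact pv_inner nums i.toNat hi (PySem.List.pyRange 0 k 1)
    (PySem.List.pyGetD nums i 0) acc nums (fun x => rfl)
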